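-- pv_equiv track=rewrite | github.com/Phorbol/MLIP-Adsorption-Workflow | adsorption_ensemble/site/primitives.py | _is_chordless_cycle4
-- ===== SOURCE A (Python) =====
-- from itertools import combinations
--
-- def _is_chordless_cycle4(quad: tuple[int, int, int, int], nbrs: dict[int, set[int]]) -> bool:
--     nodes = list(quad)
--     all_edges = {(min(i, j), max(i, j)) for i, j in combinations(nodes, 2) if j in nbrs[i]}
--     if len(all_edges) < 4:
--         return False
--     deg = {n: 0 for n in nodes}
--     for i, j in all_edges:
--         deg[i] += 1
--         deg[j] += 1
--     return all(v == 2 for v in deg.values())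
-- ===== SOURCE B (Python) =====
-- def _is_chordless_cycle4(quad, nbrs):
--     a, b, c, d = quad
--     non_edges = [(i, j) for i, j in ((a, b), (a, c), (a, d), (b, c), (b, d), (c, d))
--                  if j not in nbrs[i]]
--     # a chordless 4-cycle: four distinct nodes, exactly two of the six pairs are
--     # non-adjacent, and those two pairs are disjoint (they are the diagonals)
--     return (len({a, b, c, d}) == 4
--             and len(non_edges) == 2
--             and set(non_edges[0]).isdisjoint(non_edges[1]))
-- ===== Notes on version B (the rewrite author's own statement) =====
-- stated objective: alternative
-- what changed: Instead of materialising a deduplicated edge set plus a degree dictionary and checking |E|>=4 with all degrees equal to 2, B collects the non-adjacent pairs among the six and returns whether the four nodes are distinct, exactly two pairs are non-edges and those two are disjoint (the diagonals); Pre_ excludes the inputs where the nbrs lookups raise KeyError.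
import Mathlib
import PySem

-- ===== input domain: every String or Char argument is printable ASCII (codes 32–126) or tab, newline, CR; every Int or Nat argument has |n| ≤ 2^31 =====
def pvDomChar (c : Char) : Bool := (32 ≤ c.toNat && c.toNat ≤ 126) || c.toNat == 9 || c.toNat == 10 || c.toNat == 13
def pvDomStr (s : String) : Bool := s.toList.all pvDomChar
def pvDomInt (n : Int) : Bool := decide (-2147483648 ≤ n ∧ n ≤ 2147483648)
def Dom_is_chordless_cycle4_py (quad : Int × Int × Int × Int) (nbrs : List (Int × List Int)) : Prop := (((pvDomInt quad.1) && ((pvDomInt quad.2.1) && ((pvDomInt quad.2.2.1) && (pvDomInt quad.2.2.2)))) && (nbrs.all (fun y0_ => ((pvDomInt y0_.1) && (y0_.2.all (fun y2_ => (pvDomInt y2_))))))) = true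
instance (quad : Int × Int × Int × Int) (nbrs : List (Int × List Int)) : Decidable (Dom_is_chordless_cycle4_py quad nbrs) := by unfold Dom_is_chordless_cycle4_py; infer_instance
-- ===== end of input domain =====

-- B replaces A's edge-set + degree-dict construction by collecting the non-adjacent pairs and
-- checking: four distinct nodes, exactly two non-edges, and those two disjoint (the diagonals);
-- equivalence on Pre_ is proved below.

-- ===== PORT A =====
-- 'j in nbrs[i]' of A's set comprehension; 'none' = Python KeyError (excluded by Pre_), port returns false there.
def pvEdgeTest (d : PySem.Dict Int (List Int)) (i j : Int) : Bool :=
  match d.get? i with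
  | some s => decide (j ∈ s)
  | none => false

def is_chordless_cycle4_py (quad : Int × Int × Int × Int) (nbrs : List (Int × List Int)) : Bool :=
  let q0 := quad.1; let q1 := quad.2.1; let q2 := quad.2.2.1; let q3 := quad.2.2.2
  let d := PySem.Dict.mk nbrs
  let nodes : List Int := [q0, q1, q2, q3]
  -- combinations(nodes, 2) written out in CPython's order
  let pairs : List (Int × Int) := [(q0,q1),(q0,q2),(q0,q3),(q1,q2),(q1,q3),(q2,q3)]
  let all_edges : PySem.Set (Int × Int) :=
    PySem.Set.ofList ((pairs.filter (fun p => pvEdgeTest d p.1 p.2)).map (fun p => (min p.1 p.2, max p.1 p.2)))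
  if PySem.Set.len all_edges < 4 then false
  else
    let deg0 : PySem.Dict Int Int := nodes.foldl (fun dd n => dd.insert n 0) PySem.Dict.empty
    -- 'for i, j in all_edges' — the increments commute, so the set's (unmodelled) iteration order is immaterial;
    -- 'deg[i] += 1' as modify with default 0 (the keys are always present, so the default is never used)
    let deg : PySem.Dict Int Int :=
      all_edges.foldl (fun dd p => (dd.modify p.1 0 (· + 1)).modify p.2 0 (· + 1)) deg0
    deg.values.all (fun v => v == 2)

-- ===== PORT B =====
def is_chordless_cycle4_py_alt (quad : Int × Int × Int × Int) (nbrs : List (Int × List Int)) : Bool :=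
  let a := quad.1; let b := quad.2.1; let c := quad.2.2.1; let d := quad.2.2.2
  let dd := PySem.Dict.mk nbrs
  let non_edges : List (Int × Int) :=
    [(a,b),(a,c),(a,d),(b,c),(b,d),(c,d)].filter (fun p => !pvEdgeTest dd p.1 p.2)
  (PySem.Set.len (PySem.Set.ofList [a, b, c, d]) == 4) &&
  (non_edges.length == 2) &&
  -- set(non_edges[0]).isdisjoint(non_edges[1]); reached only when non_edges has length 2
  (match non_edges with
   | [(p, q), (r, s)] => !(p == r) && !(p == s) && !(q == r) && !(q == s)
   | _ => false)

-- ===== PRECONDITION & SPEC =====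
-- A looks up nbrs[i] for i = quad[0], quad[1], quad[2] (the first components of the combinations
-- pairs); Pre_ excludes exactly the inputs where one of those lookups raises KeyError.
def Pre_is_chordless_cycle4_py (quad : Int × Int × Int × Int) (nbrs : List (Int × List Int)) : Prop :=
  quad.1 ∈ nbrs.map Prod.fst ∧ quad.2.1 ∈ nbrs.map Prod.fst ∧ quad.2.2.1 ∈ nbrs.map Prod.fst
instance (quad : Int × Int × Int × Int) (nbrs : List (Int × List Int)) : Decidable (Pre_is_chordless_cycle4_py quad nbrs) := by unfold Pre_is_chordless_cycle4_py; infer_instance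

def pvWitness_is_chordless_cycle4_py : (Int × Int × Int × Int) × (List (Int × List Int)) :=
  ((0, 1, 2, 3), [(0, [1, 3]), (1, [0, 2]), (2, [1, 3]), (3, [0, 2])])

def Spec_is_chordless_cycle4_py (quad : Int × Int × Int × Int) (nbrs : List (Int × List Int)) (out : Bool) : Prop := out = is_chordless_cycle4_py_alt quad nbrs
instance (quad : Int × Int × Int × Int) (nbrs : List (Int × List Int)) (out : Bool) : Decidable (Spec_is_chordless_cycle4_py quad nbrs out) := by unfold Spec_is_chordless_cycle4_py; infer_instance

-- ===== CLAIM (what is proved, stated in full; the proofs are below) =====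
def Claim_equal_is_chordless_cycle4_py : Prop := ∀ (quad : Int × Int × Int × Int) (nbrs : List (Int × List Int)), Dom_is_chordless_cycle4_py quad nbrs → Pre_is_chordless_cycle4_py quad nbrs → Spec_is_chordless_cycle4_py quad nbrs (is_chordless_cycle4_py quad nbrs)

-- ===== LEMMAS AND PROOFS =====

def pvCand (q0 q1 q2 q3 : Int) : List (Int × Int) :=
  [(q0,q1),(q0,q2),(q0,q3),(q1,q2),(q1,q3),(q2,q3)]

def pvP (q0 q1 q2 q3 : Int) (nbrs : List (Int × List Int)) : List (Int × Int) :=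
  (pvCand q0 q1 q2 q3).filter (fun p => pvEdgeTest (PySem.Dict.mk nbrs) p.1 p.2)

def pvE (q0 q1 q2 q3 : Int) (nbrs : List (Int × List Int)) : List (Int × Int) :=
  PySem.Set.ofList ((pvP q0 q1 q2 q3 nbrs).map (fun p => (min p.1 p.2, max p.1 p.2)))

theorem pv_len_eq {α : Type} (s : PySem.Set α) : PySem.Set.len s = (s.length : Int) := by
  simp [PySem.Set.len]

theorem pv_update_of_mem {α : Type} [BEq α] [LawfulBEq α] (l : List α) (s : PySem.Set α)
    (h : ∀ x ∈ l, x ∈ s) : PySem.Set.update s l = s := by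
  induction l generalizing s with
  | nil => rfl
  | cons x t ih =>
    have hx : s.add x = s := by simp [PySem.Set.add, h x (by simp)]
    simp only [PySem.Set.update, List.foldl_cons] at *
    rw [hx]
    exact ih s (fun y hy => h y (by simp [hy]))

theorem pv_degflat (E : List (Int × Int)) (d : PySem.Dict Int Int) :
    E.foldl (fun dd p => (dd.modify p.1 0 (· + 1)).modify p.2 0 (· + 1)) d
      = (E.flatMap fun p => [p.1, p.2]).foldl (fun dd x => dd.modify x 0 (· + 1)) d := by
  induction E generalizing d with
  | nil => rfl
  | cons p t ih => simp only [List.flatMap_cons, List.foldl_append, List.foldl_cons, List.foldl_nil, ih]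

theorem pv_getD_insert0 (l : List Int) (d : PySem.Dict Int Int) (k : Int) (h : d.getD k 0 = 0) :
    (l.foldl (fun dd n => dd.insert n 0) d).getD k 0 = 0 := by
  induction l generalizing d with
  | nil => exact h
  | cons n t ih =>
    refine ih _ ?_
    rw [PySem.Dict.getD_insert]
    split <;> simp [h]

theorem pv_getD_empty0 (k : Int) : (PySem.Dict.empty : PySem.Dict Int Int).getD k 0 = 0 := by
  simp [PySem.Dict.getD, PySem.Dict.get?, PySem.Dict.empty]

theorem pv_sum_ite_one (ks : List Int) (x : Int) (hnd : ks.Nodup) (hx : x ∈ ks) :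
    (ks.map fun k => if x = k then 1 else 0).sum = 1 := by
  induction ks with
  | nil => simp at hx
  | cons a t ih =>
    rcases List.mem_cons.mp hx with rfl | hxt
    · have hne : ∀ k ∈ t, ¬ (x = k) := by
        intro k hk he; exact (List.nodup_cons.mp hnd).1 (he ▸ hk)
      have hz : (t.map fun k => if x = k then 1 else 0) = t.map fun _ => 0 :=
        List.map_congr_left (fun k hk => by simp [hne k hk])
      simp [hz]
    · have hax : ¬ (x = a) := fun he => (List.nodup_cons.mp hnd).1 (he ▸ hxt)
      simp only [List.map_cons, List.sum_cons, if_neg hax]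
      rw [ih (List.nodup_cons.mp hnd).2 hxt]

theorem pv_sum_counts (L ks : List Int) (hnd : ks.Nodup) (h : ∀ x ∈ L, x ∈ ks) :
    (ks.map fun k => L.count k).sum = L.length := by
  induction L with
  | nil => simp
  | cons x t ih =>
    have hmapeq : (ks.map fun k => (x :: t).count k) = ks.map fun k => t.count k + if x = k then 1 else 0 := by
      refine List.map_congr_left (fun k hk => ?_)
      simp [List.count_cons]
    rw [hmapeq, List.sum_map_add, ih (fun y hy => h y (by simp [hy])),
        pv_sum_ite_one ks x hnd (h x (by simp)), List.length_cons]

theorem pv_count_pair (a b k : Int) : List.count k [min a b, max a b] = List.count k [a, b] := by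
  simp only [List.count_cons, List.count_nil, beq_iff_eq]
  split_ifs <;> omega

theorem pv_count_norm (P : List (Int × Int)) (k : Int) :
    ((P.map fun p => (min p.1 p.2, max p.1 p.2)).flatMap fun p => [p.1, p.2]).count k
      = (P.flatMap fun p => [p.1, p.2]).count k := by
  induction P with
  | nil => rfl
  | cons p t ih =>
    have h2 : List.count k [min p.1 p.2, max p.1 p.2] = List.count k [p.1, p.2] := pv_count_pair _ _ _
    simp only [List.map_cons, List.flatMap_cons, List.count_append, ih]
    omega

theorem pv_flat_len (E : List (Int × Int)) : (E.flatMap fun p => [p.1, p.2]).length = 2 * E.length := by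
  induction E with
  | nil => rfl
  | cons p t ih => simp [List.flatMap_cons, ih]; omega

theorem pv_oflist4_short (q0 q1 q2 q3 : Int)
    (h : q0 = q1 ∨ q0 = q2 ∨ q0 = q3 ∨ q1 = q2 ∨ q1 = q3 ∨ q2 = q3) :
    (PySem.Set.ofList [q0, q1, q2, q3]).length ≤ 3 := by
  rcases h with h|h|h|h|h|h <;> subst h <;>
    simp [PySem.Set.ofList, PySem.Set.add, PySem.Set.contains] <;> split_ifs <;> simp_all

theorem pv_E_mem (q0 q1 q2 q3 : Int) (nbrs : List (Int × List Int)) :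
    ∀ x ∈ (pvE q0 q1 q2 q3 nbrs).flatMap (fun p => [p.1, p.2]),
      x ∈ PySem.Set.ofList [q0, q1, q2, q3] := by
  intro x hx
  rw [PySem.Set.mem_ofList]
  simp only [List.mem_flatMap] at hx
  obtain ⟨p, hpE, hxp⟩ := hx
  have hpE' := (PySem.Set.mem_ofList _ _).mp hpE
  simp only [List.mem_map] at hpE'
  obtain ⟨q, hq, rfl⟩ := hpE'
  have hq6 := (List.mem_filter.mp hq).1
  have hcomp : q.1 ∈ ([q0,q1,q2,q3] : List Int) ∧ q.2 ∈ ([q0,q1,q2,q3] : List Int) := by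
    simp only [pvCand, List.mem_cons, List.not_mem_nil, or_false] at hq6
    rcases hq6 with h|h|h|h|h|h <;> rw [h] <;> simp
  obtain ⟨h1, h2⟩ := hcomp
  simp only [List.mem_cons, List.not_mem_nil, or_false] at hxp h1 h2 ⊢
  rcases hxp with rfl | rfl
  · rcases min_choice q.1 q.2 with h | h <;> rw [h] <;> tauto
  · rcases max_choice q.1 q.2 with h | h <;> rw [h] <;> tauto

-- A's value, rewritten once: the degree dict has the distinct nodes as keys and counts endpoint
-- occurrences in the edge list.
theorem pv_A_eval (q0 q1 q2 q3 : Int) (nbrs : List (Int × List Int)) :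
    is_chordless_cycle4_py (q0, q1, q2, q3) nbrs =
      (if PySem.Set.len (pvE q0 q1 q2 q3 nbrs) < 4 then false
       else (PySem.Set.ofList [q0, q1, q2, q3]).all fun k =>
         ((((pvE q0 q1 q2 q3 nbrs).flatMap fun p => [p.1, p.2]).count k : Int) == 2)) := by
  have hmem := pv_E_mem q0 q1 q2 q3 nbrs
  simp only [is_chordless_cycle4_py]
  rw [show PySem.Set.ofList
      (([(q0,q1),(q0,q2),(q0,q3),(q1,q2),(q1,q3),(q2,q3)].filter
          (fun p => pvEdgeTest (PySem.Dict.mk nbrs) p.1 p.2)).map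
        (fun p => (min p.1 p.2, max p.1 p.2))) = pvE q0 q1 q2 q3 nbrs from rfl]
  set E : List (Int × Int) := pvE q0 q1 q2 q3 nbrs with hE
  refine if_congr Iff.rfl rfl ?_
  set L : List Int := E.flatMap fun p => [p.1, p.2] with hL
  set deg0 : PySem.Dict Int Int := [q0,q1,q2,q3].foldl (fun dd n => dd.insert n 0) PySem.Dict.empty with hdeg0
  have hkeys0 : deg0.keys = PySem.Set.ofList [q0, q1, q2, q3] := by
    rw [hdeg0, PySem.Dict.keys_foldl_insert _ (fun _ _ => (0 : Int))]
    simp [PySem.Dict.empty, PySem.Dict.keys, PySem.Set.update, PySem.Set.ofList]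
  rw [pv_degflat E deg0]
  set deg : PySem.Dict Int Int := L.foldl (fun dd x => dd.modify x 0 (· + 1)) deg0 with hdegd
  have hkeys : deg.keys = PySem.Set.update (PySem.Set.ofList [q0, q1, q2, q3]) L := by
    rw [hdegd, PySem.Dict.keys_foldl_modify _ 0 (fun _ _ => (· + 1)), hkeys0]
  have hkeys' : deg.keys = PySem.Set.ofList [q0, q1, q2, q3] := by
    rw [hkeys, pv_update_of_mem _ _ hmem]
  have hnd : deg.keys.Nodup := by rw [hkeys']; exact PySem.Set.nodup_ofList _
  rw [PySem.Dict.values_eq_map_keys deg hnd 0, List.all_map, hkeys']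
  have hfun : ((fun v => v == (2 : Int)) ∘ fun k => deg.getD k 0)
      = fun k => (((L.count k : Int)) == 2) := by
    funext k
    have h1 : deg.getD k 0 = deg0.getD k 0 + (L.count k : Int) := by
      rw [hdegd]; exact PySem.Dict.getD_foldl_modify_add_one L deg0 k
    have h2 : deg0.getD k 0 = 0 := by
      rw [hdeg0]; exact pv_getD_insert0 _ _ _ (pv_getD_empty0 k)
    simp [Function.comp, h1, h2]
  rw [hfun]

-- with a repeated node A returns false: >= 4 edges would force total degree >= 8 over <= 3 keys of value 2
theorem pv_A_dup_false (q0 q1 q2 q3 : Int) (nbrs : List (Int × List Int))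
    (hdup : q0 = q1 ∨ q0 = q2 ∨ q0 = q3 ∨ q1 = q2 ∨ q1 = q3 ∨ q2 = q3) :
    is_chordless_cycle4_py (q0, q1, q2, q3) nbrs = false := by
  rw [pv_A_eval]
  set E : List (Int × Int) := pvE q0 q1 q2 q3 nbrs with hE
  by_cases hlen : PySem.Set.len E < 4
  · rw [if_pos hlen]
  · rw [if_neg hlen, Bool.eq_false_iff]
    intro hall
    set L : List Int := E.flatMap fun p => [p.1, p.2] with hL
    set ks : List Int := PySem.Set.ofList [q0, q1, q2, q3] with hks
    have hndks : ks.Nodup := PySem.Set.nodup_ofList _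
    have hLmem : ∀ x ∈ L, x ∈ ks := fun x hx => pv_E_mem q0 q1 q2 q3 nbrs x hx
    have hcnt : ∀ k ∈ ks, L.count k = 2 := by
      intro k hk
      have h2 : ((L.count k : Int)) = 2 := by
        simpa using (List.all_eq_true.mp hall) k hk
      exact_mod_cast h2
    have hsum : (ks.map fun k => L.count k).sum = L.length := pv_sum_counts L ks hndks hLmem
    have hsum2 : (ks.map fun k => L.count k).sum = 2 * ks.length := by
      have hmc : (ks.map fun k => L.count k) = ks.map fun _ => 2 :=
        List.map_congr_left (fun k hk => hcnt k hk)
      rw [hmc]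
      simp [List.map_const', List.sum_replicate, smul_eq_mul]
      ring
    have hkslen : ks.length ≤ 3 := pv_oflist4_short q0 q1 q2 q3 hdup
    have hElen : 4 ≤ E.length := by
      rw [pv_len_eq] at hlen
      omega
    have hLlen : L.length = 2 * E.length := by rw [hL]; exact pv_flat_len E
    omega

theorem pv_B_dup_false (q0 q1 q2 q3 : Int) (nbrs : List (Int × List Int))
    (hdup : q0 = q1 ∨ q0 = q2 ∨ q0 = q3 ∨ q1 = q2 ∨ q1 = q3 ∨ q2 = q3) :
    is_chordless_cycle4_py_alt (q0, q1, q2, q3) nbrs = false := by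
  have h := pv_oflist4_short q0 q1 q2 q3 hdup
  have hne : (PySem.Set.len (PySem.Set.ofList [q0, q1, q2, q3]) == (4 : Int)) = false := by
    rw [pv_len_eq]
    simp only [beq_eq_false_iff_ne, ne_eq]
    intro hc
    have : (PySem.Set.ofList [q0, q1, q2, q3]).length = 4 := by exact_mod_cast hc
    omega
  simp only [is_chordless_cycle4_py_alt, hne, Bool.false_and]

set_option maxHeartbeats 3200000 in
theorem pv_distinct (q0 q1 q2 q3 : Int) (nbrs : List (Int × List Int))
    (h01 : ¬ q0 = q1) (h02 : ¬ q0 = q2) (h03 : ¬ q0 = q3)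
    (h12 : ¬ q1 = q2) (h13 : ¬ q1 = q3) (h23 : ¬ q2 = q3) :
    is_chordless_cycle4_py (q0, q1, q2, q3) nbrs = is_chordless_cycle4_py_alt (q0, q1, q2, q3) nbrs := by
  have hnd4 : ([q0, q1, q2, q3] : List Int).Nodup := by
    simp only [List.nodup_cons, List.mem_cons, List.not_mem_nil, or_false, List.nodup_nil, and_true]
    tauto
  rw [pv_A_eval]
  simp only [is_chordless_cycle4_py_alt]
  rw [PySem.Set.ofList_eq_self_of_nodup _ hnd4]
  have hguard : (PySem.Set.len ([q0, q1, q2, q3] : List Int) == (4 : Int)) = true := by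
    rw [pv_len_eq]; simp
  rw [hguard]
  have hnd6 : (([(q0,q1),(q0,q2),(q0,q3),(q1,q2),(q1,q3),(q2,q3)].map
      (fun p : Int × Int => (min p.1 p.2, max p.1 p.2))).Nodup) := by
    simp [List.nodup_cons, Prod.mk.injEq]
    omega
  have hndP : (((pvP q0 q1 q2 q3 nbrs).map
      (fun p : Int × Int => (min p.1 p.2, max p.1 p.2))).Nodup) :=
    List.Nodup.sublist (List.Sublist.map _ List.filter_sublist) hnd6
  have hEeq : pvE q0 q1 q2 q3 nbrs = (pvP q0 q1 q2 q3 nbrs).map (fun p => (min p.1 p.2, max p.1 p.2)) := by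
    rw [pvE, PySem.Set.ofList_eq_self_of_nodup _ hndP]
  rw [hEeq]
  have h10 : ¬ q1 = q0 := fun h => h01 h.symm
  have h20 : ¬ q2 = q0 := fun h => h02 h.symm
  have h30 : ¬ q3 = q0 := fun h => h03 h.symm
  have h21 : ¬ q2 = q1 := fun h => h12 h.symm
  have h31 : ¬ q3 = q1 := fun h => h13 h.symm
  have h32 : ¬ q3 = q2 := fun h => h23 h.symm
  simp only [pv_count_norm, pv_len_eq, List.length_map, pvP, pvCand]
  rcases hb01 : pvEdgeTest (PySem.Dict.mk nbrs) q0 q1 <;>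
    rcases hb02 : pvEdgeTest (PySem.Dict.mk nbrs) q0 q2 <;>
      rcases hb03 : pvEdgeTest (PySem.Dict.mk nbrs) q0 q3 <;>
        rcases hb12 : pvEdgeTest (PySem.Dict.mk nbrs) q1 q2 <;>
          rcases hb13 : pvEdgeTest (PySem.Dict.mk nbrs) q1 q3 <;>
            rcases hb23 : pvEdgeTest (PySem.Dict.mk nbrs) q2 q3 <;>
              simp_all [List.count_cons, List.filter, List.length_nil]

-- ===== VERDICT (by name: the statement is the Claim_ definition above) =====
theorem is_chordless_cycle4_py_spec : Claim_equal_is_chordless_cycle4_py := by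
  intro quad nbrs hdom hpre
  obtain ⟨q0, q1, q2, q3⟩ := quad
  unfold Spec_is_chordless_cycle4_py
  by_cases hdup : q0 = q1 ∨ q0 = q2 ∨ q0 = q3 ∨ q1 = q2 ∨ q1 = q3 ∨ q2 = q3
  · rw [pv_A_dup_false q0 q1 q2 q3 nbrs hdup, pv_B_dup_false q0 q1 q2 q3 nbrs hdup]
  · push Not at hdup
    obtain ⟨h01, h02, h03, h12, h13, h23⟩ := hdup
    exact pv_distinct q0 q1 q2 q3 nbrs h01 h02 h03 h12 h13 h23
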